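-- pv_equiv track=rewrite | github.com/SuaveIV/FamilyBot | src/familybot/lib/game_details_repository.py | _analyze_game_categories
-- ===== SOURCE A (Python) =====
-- def _analyze_game_categories(categories: list) -> tuple[bool, bool, bool]:
--     """Analyze Steam categories to determine multiplayer, co-op, and family sharing status."""
--     is_multiplayer = False
--     is_coop = False
--     is_family_shared = False
--
--     for cat in categories:
--         cat_id = cat.get("id")
--         if cat_id == 1:  # Multi-player
--             is_multiplayer = True
--         elif cat_id == 36:  # Online Multi-Player
--             is_multiplayer = True
--         elif cat_id == 38:  # Online Co-op
--             is_multiplayer = True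
--             is_coop = True
--         elif cat_id == 62:  # Family Sharing
--             is_family_shared = True
--
--     return is_multiplayer, is_coop, is_family_shared
-- ===== SOURCE B (Python) =====
-- def _analyze_game_categories(categories: list) -> tuple[bool, bool, bool]:
--     ids = [cat.get("id") for cat in categories]
--     is_multiplayer = any(i in (1, 36, 38) for i in ids)
--     is_coop = 38 in ids
--     is_family_shared = 62 in ids
--     return is_multiplayer, is_coop, is_family_shared
-- ===== Notes on version B (the rewrite author's own statement) =====
-- stated objective: idiomatic
-- what changed: Replaces the single stateful elif-chain pass with building a list of ids once and deriving each of the three flags independently via membership tests (any/in).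
import Mathlib
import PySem

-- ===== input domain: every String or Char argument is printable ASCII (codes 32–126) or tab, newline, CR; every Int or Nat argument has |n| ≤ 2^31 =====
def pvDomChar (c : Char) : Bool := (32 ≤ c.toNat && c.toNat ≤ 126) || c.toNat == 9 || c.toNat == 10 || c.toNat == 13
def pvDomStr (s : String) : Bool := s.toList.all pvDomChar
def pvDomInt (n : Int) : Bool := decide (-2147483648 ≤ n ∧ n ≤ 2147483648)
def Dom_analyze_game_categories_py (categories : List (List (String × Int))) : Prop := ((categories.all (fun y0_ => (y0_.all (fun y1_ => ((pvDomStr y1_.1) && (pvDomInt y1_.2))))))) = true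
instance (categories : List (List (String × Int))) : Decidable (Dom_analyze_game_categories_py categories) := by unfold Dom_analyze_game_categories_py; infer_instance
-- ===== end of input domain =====

-- ===== PORT A =====
-- B builds the id list once and derives the three flags independently via membership (idiomatic decomposition).
-- cat.get("id") on the association-list dict: first match, none if absent (exact Python dict.get)
def pvGetId (cat : List (String × Int)) : Option Int := (PySem.Dict.mk cat).get? "id"

def analyze_game_categories_py (categories : List (List (String × Int))) : Bool × Bool × Bool :=
  categories.foldl (fun (st : Bool × Bool × Bool) cat =>
    let cat_id := pvGetId cat
    if cat_id = some 1 then (true, st.2.1, st.2.2)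
    else if cat_id = some 36 then (true, st.2.1, st.2.2)
    else if cat_id = some 38 then (true, true, st.2.2)
    else if cat_id = some 62 then (st.1, st.2.1, true)
    else st) (false, false, false)

-- ===== PORT B =====
def analyze_game_categories_py_alt (categories : List (List (String × Int))) : Bool × Bool × Bool :=
  let ids := categories.map pvGetId
  let is_multiplayer := ids.any (fun i => i == some 1 || i == some 36 || i == some 38)
  let is_coop := ids.contains (some 38)
  let is_family_shared := ids.contains (some 62)
  (is_multiplayer, is_coop, is_family_shared)

-- ===== PRECONDITION & SPEC =====
def Spec_analyze_game_categories_py (categories : List (List (String × Int))) (out : Bool × Bool × Bool) : Prop := out = analyze_game_categories_py_alt categories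
instance (categories : List (List (String × Int))) (out : Bool × Bool × Bool) : Decidable (Spec_analyze_game_categories_py categories out) := by unfold Spec_analyze_game_categories_py; infer_instance

-- ===== CLAIM (what is proved, stated in full; the proofs are below) =====
def Claim_equal_analyze_game_categories_py : Prop := ∀ (categories : List (List (String × Int))), Dom_analyze_game_categories_py categories → Spec_analyze_game_categories_py categories (analyze_game_categories_py categories)

-- ===== LEMMAS AND PROOFS =====
theorem pvFold_char (categories : List (List (String × Int))) (m c f : Bool) :
    categories.foldl (fun (st : Bool × Bool × Bool) cat =>
      let cat_id := pvGetId cat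
      if cat_id = some 1 then (true, st.2.1, st.2.2)
      else if cat_id = some 36 then (true, st.2.1, st.2.2)
      else if cat_id = some 38 then (true, true, st.2.2)
      else if cat_id = some 62 then (st.1, st.2.1, true)
      else st) (m, c, f)
    = (m || (categories.map pvGetId).any (fun i => i == some 1 || i == some 36 || i == some 38),
       c || (categories.map pvGetId).contains (some 38),
       f || (categories.map pvGetId).contains (some 62)) := by
  induction categories generalizing m c f with
  | nil => simp
  | cons cat rest ih =>
    simp only [List.foldl_cons, List.map_cons, List.any_cons, List.contains_cons]
    split_ifs with h1 h36 h38 h62 <;> simp only [ih] <;> clear ih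
    · simp [h1, Bool.or_assoc, Bool.or_comm]
    · simp [h36, Bool.or_assoc, Bool.or_comm]
    · simp [h38, Bool.or_assoc]
    · simp [h62, Bool.or_assoc]
    · simp [beq_eq_false_iff_ne.mpr h1, beq_eq_false_iff_ne.mpr h36,
            beq_eq_false_iff_ne.mpr h38, beq_eq_false_iff_ne.mpr (Ne.symm h38),
            beq_eq_false_iff_ne.mpr (Ne.symm h62)]

theorem analyze_game_categories_py_spec : Claim_equal_analyze_game_categories_py := by
  intro categories _
  unfold Spec_analyze_game_categories_py analyze_game_categories_py analyze_game_categories_py_alt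
  rw [pvFold_char]
  simp
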